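-- pv_equiv track=rewrite | github.com/pypi-data/pypi-mirror-36 | packages/dataflows-serverless/dataflows_serverless-0.0.1.tar.gz/dataflows_serverless-0.0.1/dataflows_serverless/secondary_chain.py | get_secondary_input_rows
-- ===== SOURCE A (Python) =====
-- def get_secondary_input_rows(rows, secondary, num_secondaries, primary_rows_count):
--     rows_per_secondary = int(primary_rows_count / num_secondaries)
--     cur_secondary = 0
--     cur_rows_count = 0
--     for row in rows:
--         if cur_secondary == secondary:
--             yield row
--         if cur_rows_count == rows_per_secondary:
--             cur_secondary += 1
--             cur_rows_count = 0
--         else: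
--             cur_rows_count += 1
-- ===== SOURCE B (Python) =====
-- def get_secondary_input_rows(rows, secondary, num_secondaries, primary_rows_count):
--     block = int(primary_rows_count / num_secondaries) + 1
--     blocks = [rows[i:i + block] for i in range(0, len(rows), block)]
--     if 0 <= secondary < len(blocks):
--         yield from blocks[secondary]
-- ===== Notes on version B (the rewrite author's own statement) =====
-- stated objective: simpler
-- what changed: Replaces A's single pass with two running counters by a two-stage decomposition: first chunk the rows into blocks of size int(primary_rows_count/num_secondaries)+1 with slicing, then yield the block at index `secondary`; Pre_ excludes num_secondaries = 0 (A raises ZeroDivisionError), rows_per_secondary = -1 (B's range step is 0, ValueError), and a negative rows_per_secondary with secondary = 0 (counts outside the natural domain, where A's piling of every row into block 0 is an artefact of its counter never reaching a negative target while B selects no block).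
-- outside the precondition, e.g. on get_secondary_input_rows([{'a': '1'}], 0, 1, -5): A returns [{'a': '1'}], B returns []; on get_secondary_input_rows([{'a': '1'}], 0, 2, -3): A returns [{'a': '1'}], B raises ValueError
import Mathlib
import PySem

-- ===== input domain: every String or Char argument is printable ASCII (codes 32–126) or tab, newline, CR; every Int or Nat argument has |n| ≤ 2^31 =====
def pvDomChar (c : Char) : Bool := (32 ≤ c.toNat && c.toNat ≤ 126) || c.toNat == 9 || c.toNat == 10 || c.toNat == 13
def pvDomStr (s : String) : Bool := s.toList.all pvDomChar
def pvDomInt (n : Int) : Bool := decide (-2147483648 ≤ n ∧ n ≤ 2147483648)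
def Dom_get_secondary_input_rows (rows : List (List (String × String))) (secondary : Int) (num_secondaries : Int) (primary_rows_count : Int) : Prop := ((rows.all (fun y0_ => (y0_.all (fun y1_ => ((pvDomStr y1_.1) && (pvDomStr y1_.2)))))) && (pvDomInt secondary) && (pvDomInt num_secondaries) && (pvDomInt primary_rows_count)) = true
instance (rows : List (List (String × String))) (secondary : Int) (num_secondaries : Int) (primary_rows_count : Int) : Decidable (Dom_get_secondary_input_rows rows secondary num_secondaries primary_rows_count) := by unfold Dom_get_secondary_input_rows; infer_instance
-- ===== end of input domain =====

-- B chunks the rows into blocks with slicing and yields the block at index `secondary`,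
-- instead of A's single pass with two running counters (objective: simpler).
-- On the domain (|ints| ≤ 2^31) Python's int(p/q) is PySem.Int.truncdiv, exact there.

-- ===== PORT A =====
def get_secondary_input_rows (rows : List (List (String × String))) (secondary : Int) (num_secondaries : Int) (primary_rows_count : Int) : List (List (String × String)) :=
  let rows_per_secondary := PySem.Int.truncdiv primary_rows_count num_secondaries
  (rows.foldl (fun (st : Int × Int × List (List (String × String))) row =>
      let acc := if st.1 = secondary then st.2.2 ++ [row] else st.2.2
      if st.2.1 = rows_per_secondary then (st.1 + 1, 0, acc) else (st.1, st.2.1 + 1, acc))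
    (0, 0, [])).2.2

-- ===== PORT B =====
def get_secondary_input_rows_alt (rows : List (List (String × String))) (secondary : Int) (num_secondaries : Int) (primary_rows_count : Int) : List (List (String × String)) :=
  let block := PySem.Int.truncdiv primary_rows_count num_secondaries + 1
  let blocks := (PySem.List.pyRange 0 (rows.length : Int) block).map
      (fun i => PySem.List.slice rows (some i) (some (i + block)))
  if 0 ≤ secondary ∧ secondary < (blocks.length : Int) then
    PySem.List.pyGetD blocks secondary []
  else
    []

-- ===== PRECONDITION & SPEC =====
-- Pre_ excludes num_secondaries = 0, where Python A raises ZeroDivisionError; rows_per_secondary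
-- = -1, where B's range step is 0 and it raises ValueError; and a negative rows_per_secondary
-- (possible only for a negative row count / secondary count, outside the function's natural
-- domain) combined with secondary = 0, where A's piling of every row into block 0 is an artefact
-- of its counter never reaching a negative target while B selects no block.
def Pre_get_secondary_input_rows (rows : List (List (String × String))) (secondary : Int) (num_secondaries : Int) (primary_rows_count : Int) : Prop :=
  num_secondaries ≠ 0 ∧ PySem.Int.truncdiv primary_rows_count num_secondaries ≠ -1 ∧
    (0 ≤ PySem.Int.truncdiv primary_rows_count num_secondaries ∨ secondary ≠ 0)
instance (rows : List (List (String × String))) (secondary : Int) (num_secondaries : Int) (primary_rows_count : Int) : Decidable (Pre_get_secondary_input_rows rows secondary num_secondaries primary_rows_count) := by unfold Pre_get_secondary_input_rows; infer_instance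
def pvWitness_get_secondary_input_rows : (List (List (String × String))) × Int × Int × Int :=
  ([[("a", "1")], [("a", "2")], [("a", "3")]], 1, 2, 3)
def Spec_get_secondary_input_rows (rows : List (List (String × String))) (secondary : Int) (num_secondaries : Int) (primary_rows_count : Int) (out : List (List (String × String))) : Prop := out = get_secondary_input_rows_alt rows secondary num_secondaries primary_rows_count
instance (rows : List (List (String × String))) (secondary : Int) (num_secondaries : Int) (primary_rows_count : Int) (out : List (List (String × String))) : Decidable (Spec_get_secondary_input_rows rows secondary num_secondaries primary_rows_count out) := by unfold Spec_get_secondary_input_rows; infer_instance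

-- ===== CLAIM (what is proved, stated in full; the proofs are below) =====
def Claim_equal_get_secondary_input_rows : Prop := ∀ (rows : List (List (String × String))) (secondary : Int) (num_secondaries : Int) (primary_rows_count : Int), Dom_get_secondary_input_rows rows secondary num_secondaries primary_rows_count → Pre_get_secondary_input_rows rows secondary num_secondaries primary_rows_count → Spec_get_secondary_input_rows rows secondary num_secondaries primary_rows_count (get_secondary_input_rows rows secondary num_secondaries primary_rows_count)

-- ===== LEMMAS AND PROOFS =====

-- A's loop body, named for the proofs (definitionally the lambda inside the port of A)
def stepA (sec R : Int) (st : Int × Int × List (List (String × String))) (row : List (String × String)) : Int × Int × List (List (String × String)) :=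
  let acc := if st.1 = sec then st.2.2 ++ [row] else st.2.2
  if st.2.1 = R then (st.1 + 1, 0, acc) else (st.1, st.2.1 + 1, acc)

-- finishing the current block: with k rows still to go before the counter resets,
-- the fold consumes the first k rows (appending them iff the current block is `sec`)
-- and continues on the rest with block index s+1 and counter 0
theorem stepA_chunk (sec R : Int) :
    ∀ (rows : List (List (String × String))) (s : Int) (acc : List (List (String × String))) (k : Nat),
      1 ≤ k → (k : Int) ≤ R + 1 →
      (rows.foldl (stepA sec R) (s, R + 1 - k, acc)).2.2 =
        ((rows.drop k).foldl (stepA sec R) (s + 1, 0, acc ++ (if s = sec then rows.take k else []))).2.2 := by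
  intro rows
  induction rows with
  | nil => intro s acc k _ _; by_cases h : s = sec <;> simp [h]
  | cons r rs ih =>
    intro s acc k hk1 hkR
    by_cases hk : k = 1
    · subst hk
      have hc : R + 1 - (1:Nat) = R := by push_cast; ring
      simp only [List.foldl_cons, stepA, hc, List.drop_succ_cons, List.drop_zero,
        List.take_succ_cons, List.take_zero]
      by_cases h : s = sec <;> simp [h]
    · have hc : ¬ (R + 1 - (k:Int) = R) := by
        intro h; apply hk; omega
      have hst : R + 1 - (k:Int) + 1 = R + 1 - ((k - 1 : Nat) : Int) := by
        have : ((k - 1 : Nat) : Int) = (k : Int) - 1 := by omega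
        rw [this]; ring
      simp only [List.foldl_cons, stepA, if_neg hc]
      rw [hst, ih _ _ (k - 1) (by omega) (by omega)]
      have hdrop : (r :: rs).drop k = rs.drop (k - 1) := by
        rcases Nat.exists_eq_add_of_le hk1 with ⟨m, hm⟩
        subst hm; simp [Nat.add_comm]
      have htake : (r :: rs).take k = r :: rs.take (k - 1) := by
        rcases Nat.exists_eq_add_of_le hk1 with ⟨m, hm⟩
        subst hm; simp [Nat.add_comm]
      rw [hdrop, htake]
      by_cases h : s = sec <;> simp [h]

-- the whole fold, by strong induction over whole blocks: starting at block s with counter 0,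
-- the rows appended are exactly the block of size R+1 at offset (sec - s)·(R+1)
theorem foldA_main (sec R : Int) (hR : 0 ≤ R) :
    ∀ (n : Nat) (rows : List (List (String × String))), rows.length ≤ n →
      ∀ (s : Int) (acc : List (List (String × String))),
      (rows.foldl (stepA sec R) (s, 0, acc)).2.2 =
        acc ++ (if s ≤ sec then (rows.drop ((sec - s).toNat * (R + 1).toNat)).take (R + 1).toNat else []) := by
  intro n
  induction n with
  | zero =>
    intro rows hlen s acc
    have : rows = [] := List.eq_nil_of_length_eq_zero (Nat.le_zero.mp hlen)
    subst this; by_cases h : s ≤ sec <;> simp [h]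
  | succ n ih =>
    intro rows hlen s acc
    cases rows with
    | nil => by_cases h : s ≤ sec <;> simp [h]
    | cons r rs =>
      set k := (R + 1).toNat with hkdef
      have hk1 : 1 ≤ k := by omega
      have hkR : (k : Int) ≤ R + 1 := by omega
      have h0 : (0 : Int) = R + 1 - (k : Int) := by omega
      rw [h0, stepA_chunk sec R (r :: rs) s acc k hk1 hkR]
      have hlen' : ((r :: rs).drop k).length ≤ n := by
        simp only [List.length_drop, List.length_cons] at *
        omega
      rw [ih _ hlen' (s + 1) _]
      rcases lt_trichotomy sec s with hlt | heq | hgt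
      · have h1 : ¬ (s = sec) := by omega
        have h2 : ¬ (s + 1 ≤ sec) := by omega
        have h3 : ¬ (s ≤ sec) := by omega
        simp [h1, h2, h3]
      · subst heq
        have h2 : ¬ (sec + 1 ≤ sec) := by omega
        simp [h2, hkdef]
      · have h1 : ¬ (s = sec) := by omega
        have h2 : s + 1 ≤ sec := by omega
        have h3 : s ≤ sec := by omega
        have h4 : (sec - s).toNat = (sec - (s + 1)).toNat + 1 := by omega
        simp only [h1, if_false, h2, if_true, h3, List.append_nil]
        rw [List.drop_drop]
        have h5 : k + (sec - (s + 1)).toNat * k = (sec - s).toNat * k := by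
          rw [h4]; ring
        rw [h5]

-- the chunk-and-index program computes block `sec` as a drop/take at offset b·sec
theorem B_core (rows : List (List (String × String))) (sec b : Int) (hb : 0 < b) :
    (if 0 ≤ sec ∧ sec < ((((PySem.List.pyRange 0 (rows.length : Int) b).map
          (fun i => PySem.List.slice rows (some i) (some (i + b)))).length : Int)) then
        PySem.List.pyGetD ((PySem.List.pyRange 0 (rows.length : Int) b).map
          (fun i => PySem.List.slice rows (some i) (some (i + b)))) sec []
      else []) =
    (if 0 ≤ sec then (rows.drop ((b * sec).toNat)).take b.toNat else []) := by
  rw [PySem.List.pyRange_of_pos 0 (rows.length : Int) hb]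
  simp only [List.map_map, List.length_map, List.length_range]
  set N : Nat := (if 0 < (rows.length : Int) then (((rows.length : Int) - 0 + b - 1) / b).toNat else 0) with hN
  by_cases hs : 0 ≤ sec
  · have h1 : 0 ≤ b * sec := mul_nonneg (le_of_lt hb) hs
    by_cases hlt : sec < (N : Int)
    · rw [if_pos ⟨hs, hlt⟩, if_pos hs]
      rw [PySem.List.pyGetD_eq_getElem _ _ hs (by simpa using hlt)]
      simp only [List.getElem_map, List.getElem_range, Function.comp]
      have hcast : (sec.toNat : Int) = sec := Int.toNat_of_nonneg hs
      rw [hcast]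
      rw [PySem.List.slice_toNat _ (by omega) (by omega)]
      simp only [zero_add]
      congr 1
      omega
    · rw [if_neg (fun h => hlt h.2), if_pos hs]
      have hLlb : (rows.length : Int) ≤ b * sec := by
        by_cases hL0 : 0 < (rows.length : Int)
        · have hNval : N = ((((rows.length : Int)) - 0 + b - 1) / b).toNat := by
            rw [hN, if_pos hL0]
          set q : Int := ((rows.length : Int) - 0 + b - 1) / b with hq
          have hq0 : 0 ≤ q := Int.ediv_nonneg (by omega) (by omega)
          have hqsec : q ≤ sec := by omega
          have hdm := Int.mul_ediv_add_emod ((rows.length : Int) - 0 + b - 1) b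
          have hr0 := Int.emod_nonneg ((rows.length : Int) - 0 + b - 1) (by omega : b ≠ 0)
          have hrlt := Int.emod_lt_of_pos ((rows.length : Int) - 0 + b - 1) hb
          have hqb : b * q ≤ b * sec := mul_le_mul_of_nonneg_left hqsec (le_of_lt hb)
          linarith [hdm, hr0, hrlt, hqb]
        · omega
      rw [List.drop_eq_nil_of_le (by omega : rows.length ≤ (b * sec).toNat)]
      simp
  · rw [if_neg (fun h => hs h.1), if_neg hs]

-- a negative block target: the nonnegative counter never reaches it, so the block index stays put
theorem foldA_neg (sec R : Int) (hR : R < 0) :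
    ∀ (rows : List (List (String × String))) (s c : Int) (acc : List (List (String × String))),
      0 ≤ c → (rows.foldl (stepA sec R) (s, c, acc)).2.2 = acc ++ (if s = sec then rows else []) := by
  intro rows
  induction rows with
  | nil => intro s c acc _; by_cases h : s = sec <;> simp [h]
  | cons r rs ih =>
    intro s c acc hc
    have hne : ¬ (c = R) := by omega
    simp only [List.foldl_cons, stepA, if_neg hne]
    rw [ih s (c + 1) _ (by omega)]
    by_cases h : s = sec <;> simp [h]

-- a negative step makes the chunking range empty, so no block is selected
theorem B_core_neg (rows : List (List (String × String))) (sec b : Int) (hb : b < 0) :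
    (if 0 ≤ sec ∧ sec < ((((PySem.List.pyRange 0 (rows.length : Int) b).map
          (fun i => PySem.List.slice rows (some i) (some (i + b)))).length : Int)) then
        PySem.List.pyGetD ((PySem.List.pyRange 0 (rows.length : Int) b).map
          (fun i => PySem.List.slice rows (some i) (some (i + b)))) sec []
      else []) = [] := by
  have hrange : PySem.List.pyRange 0 (rows.length : Int) b = [] := by
    simp only [PySem.List.pyRange]
    rw [if_neg (by omega : ¬ b = 0), if_neg (by omega : ¬ (0:Int) < b),
      if_neg (by omega : ¬ ((rows.length : Int) < 0))]
    simp
  rw [hrange]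
  simp

-- ===== VERDICT (by name: the statement is the Claim_ definition above) =====
theorem get_secondary_input_rows_spec : Claim_equal_get_secondary_input_rows := by
  intro rows secondary num_secondaries primary_rows_count _hDom hPre
  obtain ⟨hq, hR1, hR2⟩ := hPre
  set R : Int := PySem.Int.truncdiv primary_rows_count num_secondaries with hRdef
  have hA : get_secondary_input_rows rows secondary num_secondaries primary_rows_count =
      (rows.foldl (stepA secondary R) (0, 0, [])).2.2 := rfl
  unfold Spec_get_secondary_input_rows get_secondary_input_rows_alt
  by_cases hR : 0 ≤ R
  · rw [hA, foldA_main secondary R hR rows.length rows le_rfl 0 []]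
    rw [B_core rows secondary (R + 1) (by omega)]
    simp only [List.nil_append, Int.sub_zero]
    by_cases hs : 0 ≤ secondary
    · rw [if_pos hs, if_pos hs]
      congr 2
      have h1 : 0 ≤ (R + 1) * secondary := by positivity
      have h2 : ((secondary.toNat * (R + 1).toNat : Nat) : Int) = (R + 1) * secondary := by
        push_cast [Int.toNat_of_nonneg hs, Int.toNat_of_nonneg (by omega : (0:Int) ≤ R + 1)]
        ring
      omega
    · rw [if_neg hs, if_neg hs]
  · have hsec : secondary ≠ 0 := by
      rcases hR2 with h | h
      · exact absurd h hR
      · exact h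
    rw [hA, foldA_neg secondary R (by omega) rows 0 0 [] le_rfl]
    rw [B_core_neg rows secondary (R + 1) (by omega)]
    rw [if_neg (fun h => hsec h.symm)]
    simp
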